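-- pv_equiv track=rewrite | github.com/jmcol/fastq-stats | fastq_stats.py | insert_k_mer_permutations
-- ===== SOURCE A (Python) =====
-- from typing import Iterable, List, Tuple
--
-- def insert_k_mer_permutations(possibilities: List[Tuple],
--                               indices: List[int],
--                               known: str) -> List[str]:
--     """Re-insert K-mer possibilities from N base read.
--     :param possibilities: List of permutations from unknown.
--     :param indices: Indices where wildcard reads occur.
--     :param known: Remaining reads that are not wildcards.
--     :return: Exploded list of K-mer permutations."""
--     k_mer_permutations = []
--     for possibility in possibilities:
--         possible_k_mer = known
--         for index, letter in zip(indices, possibility):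
--             possible_k_mer = possible_k_mer[:index]\
--                              + letter\
--                              + possible_k_mer[index:]
--
--         k_mer_permutations.append(possible_k_mer)
--
--     return k_mer_permutations
-- ===== SOURCE B (Python) =====
-- from typing import List, Tuple
--
--
-- def _explode(possibility, indices, known):
--     """Build one k-mer via a piece table: the string is kept as a list of
--     pieces; an insertion appends/prepends a piece or splits a single piece."""
--     pieces = [known]
--     total = len(known)
--     for index, letter in zip(indices, possibility):
--         pos = index if index >= 0 else total + index
--         if pos < 0:
--             pos = 0
--         if pos > total:
--             pos = total
--         if pos == total:
--             pieces.append(letter)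
--         elif pos == 0:
--             pieces.insert(0, letter)
--         else:
--             c = 0
--             j = 0
--             while c + len(pieces[j]) < pos:
--                 c += len(pieces[j])
--                 j += 1
--             piece = pieces[j]
--             off = pos - c
--             pieces[j:j + 1] = [piece[:off], letter, piece[off:]]
--         total += len(letter)
--     return ''.join(pieces)
--
--
-- def insert_k_mer_permutations(possibilities: List[Tuple],
--                               indices: List[int],
--                               known: str) -> List[str]:
--     return [_explode(possibility, indices, known) for possibility in possibilities]
-- ===== Notes on version B (the rewrite author's own statement) =====
-- stated objective: faster
-- what changed: B replaces A's per-insertion whole-string slice-and-concatenate with a piece table: each insertion appends/prepends a piece or splits a single piece found by scanning piece lengths, and the string is joined once at the end.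
import Mathlib
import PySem

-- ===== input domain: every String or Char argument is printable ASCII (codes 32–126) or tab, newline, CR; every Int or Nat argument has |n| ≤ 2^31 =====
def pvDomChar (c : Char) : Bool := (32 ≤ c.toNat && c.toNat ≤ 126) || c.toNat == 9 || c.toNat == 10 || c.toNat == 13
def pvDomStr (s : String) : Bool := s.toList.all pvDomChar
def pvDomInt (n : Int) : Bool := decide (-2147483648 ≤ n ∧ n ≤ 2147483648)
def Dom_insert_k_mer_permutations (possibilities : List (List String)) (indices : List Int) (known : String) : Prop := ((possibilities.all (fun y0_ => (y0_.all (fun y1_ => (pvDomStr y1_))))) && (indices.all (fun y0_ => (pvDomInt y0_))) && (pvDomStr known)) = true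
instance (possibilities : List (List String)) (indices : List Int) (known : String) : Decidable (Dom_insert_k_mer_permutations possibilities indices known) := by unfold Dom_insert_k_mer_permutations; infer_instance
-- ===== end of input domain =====

-- B replaces A's per-insertion whole-string slice-and-concatenate with a piece table (append/prepend or split one piece per insertion, join once).

-- ===== PORT A =====
-- possible_k_mer[:index] + letter + possible_k_mer[index:] ported on the code-point list via PySem.List.slice
def insert_k_mer_permutations (possibilities : List (List String)) (indices : List Int) (known : String) : List String :=
  possibilities.foldl
    (fun k_mer_permutations possibility =>
      let possible_k_mer :=
        (indices.zip possibility).foldl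
          (fun s il =>
            PySem.List.slice s none (some il.1) ++ il.2.toList ++ PySem.List.slice s (some il.1) none)
          known.toList
      k_mer_permutations ++ [String.ofList possible_k_mer])
    []

-- ===== PORT B =====
-- pos = index if index >= 0 else total + index; then if pos < 0: pos = 0; if pos > total: pos = total
def pvClamp (total : Nat) (index : Int) : Nat :=
  let pos : Int := if 0 ≤ index then index else (total : Int) + index
  let pos : Int := if pos < 0 then 0 else pos
  (if (total : Int) < pos then (total : Int) else pos).toNat

-- the interior `while c + len(pieces[j]) < pos` scan + split of piece j at off = pos - c
-- (python's pieces[j][:off]/[off:] with 0 ≤ off ≤ len are take/drop; the [] case is unreachable: pos < total)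
def pvSplit : List (List Char) → Nat → List Char → List (List Char)
  | [], _, w => [w]
  | p :: ps, pos, w =>
    if p.length < pos then p :: pvSplit ps (pos - p.length) w
    else p.take pos :: w :: p.drop pos :: ps

-- loop body of `_explode`: state = (pieces, total)
def pvPieceStep (st : List (List Char) × Nat) (il : Int × String) : List (List Char) × Nat :=
  let pos := pvClamp st.2 il.1
  let pieces :=
    if pos = st.2 then st.1 ++ [il.2.toList]
    else if pos = 0 then il.2.toList :: st.1
    else pvSplit st.1 pos il.2.toList
  (pieces, st.2 + il.2.toList.length)

def insert_k_mer_permutations_alt (possibilities : List (List String)) (indices : List Int) (known : String) : List String :=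
  possibilities.map
    (fun possibility =>
      let st := (indices.zip possibility).foldl pvPieceStep ([known.toList], known.toList.length)
      String.ofList st.1.flatten)

-- ===== PRECONDITION & SPEC =====
def Spec_insert_k_mer_permutations (possibilities : List (List String)) (indices : List Int) (known : String) (out : List String) : Prop := out = insert_k_mer_permutations_alt possibilities indices known
instance (possibilities : List (List String)) (indices : List Int) (known : String) (out : List String) : Decidable (Spec_insert_k_mer_permutations possibilities indices known out) := by unfold Spec_insert_k_mer_permutations; infer_instance

-- ===== CLAIM (what is proved, stated in full; the proofs are below) =====
def Claim_equal_insert_k_mer_permutations : Prop := ∀ (possibilities : List (List String)) (indices : List Int) (known : String), Dom_insert_k_mer_permutations possibilities indices known → Spec_insert_k_mer_permutations possibilities indices known (insert_k_mer_permutations possibilities indices known)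

-- ===== LEMMAS AND PROOFS =====

lemma pv_clamp_eq (n : Nat) (i : Int) : pvClamp n i = PySem.List.clampIdx n i := by
  unfold pvClamp PySem.List.clampIdx
  dsimp only
  split_ifs <;> omega

lemma pv_clamp_le (n : Nat) (i : Int) : pvClamp n i ≤ n := by
  unfold pvClamp
  dsimp only
  split_ifs <;> omega

-- A's slices at an arbitrary Int index are take/drop at the clamped position
lemma pv_slice_to (s : List Char) (i : Int) :
    PySem.List.slice s none (some i) = s.take (pvClamp s.length i) := by
  rw [pv_clamp_eq]
  simp [PySem.List.slice]

lemma pv_slice_from (s : List Char) (i : Int) :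
    PySem.List.slice s (some i) none = s.drop (pvClamp s.length i) := by
  rw [pv_clamp_eq, PySem.List.slice_some_none]

-- splitting a piece realises the splice on the joined string
lemma pv_flatten_split (pieces : List (List Char)) (pos : Nat) (w : List Char)
    (h : pos ≤ pieces.flatten.length) :
    (pvSplit pieces pos w).flatten
      = pieces.flatten.take pos ++ w ++ pieces.flatten.drop pos := by
  induction pieces generalizing pos with
  | nil =>
    simp at h
    subst h
    simp [pvSplit]
  | cons p ps ih =>
    by_cases hp : p.length < pos
    · have h2 : pos - p.length ≤ ps.flatten.length := by
        simp only [List.flatten_cons, List.length_append] at h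
        omega
      simp only [pvSplit, if_pos hp, List.flatten_cons, ih _ h2]
      rw [List.take_append, List.drop_append,
        List.take_of_length_le (le_of_lt hp), List.drop_eq_nil_of_le (le_of_lt hp)]
      simp [List.append_assoc]
    · have hle : pos ≤ p.length := by omega
      simp only [pvSplit, if_neg hp, List.flatten_cons]
      rw [List.take_append_of_le_length hle, List.drop_append_of_le_length hle]
      simp [List.append_assoc]

-- one piece-table step realises A's splice on the joined string
lemma pv_pieceStep (pieces : List (List Char)) (s : List Char) (i : Int) (w : String)
    (hf : pieces.flatten = s) :
    (pvPieceStep (pieces, s.length) (i, w)).1.flatten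
      = PySem.List.slice s none (some i) ++ w.toList ++ PySem.List.slice s (some i) none ∧
    (pvPieceStep (pieces, s.length) (i, w)).2
      = (PySem.List.slice s none (some i) ++ w.toList
          ++ PySem.List.slice s (some i) none).length := by
  have hple : pvClamp s.length i ≤ s.length := pv_clamp_le _ _
  rw [pv_slice_to, pv_slice_from]
  unfold pvPieceStep
  dsimp only
  set pos : Nat := pvClamp s.length i with hpos
  constructor
  · by_cases he : pos = s.length
    · rw [if_pos he, he]
      simp [hf, List.take_of_length_le (le_refl s.length), List.drop_eq_nil_of_le (le_refl s.length)]
    · rw [if_neg he]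
      by_cases h0 : pos = 0
      · rw [if_pos h0, h0]
        simp [hf]
      · rw [if_neg h0]
        rw [pv_flatten_split pieces pos w.toList (by rw [hf]; exact hple), hf]
  · simp only [List.length_append, List.length_take, List.length_drop]
    omega

-- loop invariant: the piece-table fold tracks A's string fold and its length
lemma pv_loop (pairs : List (Int × String)) (pieces : List (List Char)) (s : List Char)
    (hf : pieces.flatten = s) :
    ((pairs.foldl pvPieceStep (pieces, s.length)).1).flatten
      = pairs.foldl
          (fun s il =>
            PySem.List.slice s none (some il.1) ++ il.2.toList ++ PySem.List.slice s (some il.1) none)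
          s := by
  induction pairs generalizing pieces s with
  | nil => simpa using hf
  | cons p rest ih =>
    obtain ⟨i, w⟩ := p
    simp only [List.foldl_cons]
    obtain ⟨h1, h2⟩ := pv_pieceStep pieces s i w hf
    have hst : pvPieceStep (pieces, s.length) (i, w)
        = ((pvPieceStep (pieces, s.length) (i, w)).1,
           (PySem.List.slice s none (some i) ++ w.toList
             ++ PySem.List.slice s (some i) none).length) := by
      rw [← h2]
    rw [hst]
    exact ih _ _ h1
-- ===== VERDICT (by name: the statement is the Claim_ definition above) =====
theorem insert_k_mer_permutations_spec : Claim_equal_insert_k_mer_permutations := by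
  intro possibilities indices known _
  unfold Spec_insert_k_mer_permutations insert_k_mer_permutations insert_k_mer_permutations_alt
  rw [PySem.List.foldl_append_singleton_eq_map]
  simp only [List.nil_append]
  apply List.map_congr_left
  intro possibility _
  rw [pv_loop (indices.zip possibility) [known.toList] known.toList (by simp)]
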